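-- pv_equiv track=rewrite | github.com/emilylinh/school | CS 8/functions_lab4.py | stringToPermutation
-- ===== SOURCE A (Python) =====
-- def stringToPermutation(s):
--     permutation = ""
--     x = {}
--     s_sorted = sorted(s)
--     acc = 1
--     for ch in s_sorted:
--         number = ord(ch)
--         for number in s_sorted:
--             if number not in x:
--                 x[number] = acc
--                 acc = acc + 1
--     for i in s_sorted:
--         permutation += str(x[i])
--     return permutation
-- ===== SOURCE B (Python) =====
-- def stringToPermutation(s):
--     result = ""
--     prev = None
--     rank = 0
--     for ch in sorted(s):
--         if ch != prev:
--             rank += 1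
--             prev = ch
--         result += str(rank)
--     return result
-- ===== Notes on version B (the rewrite author's own statement) =====
-- stated objective: simpler
-- what changed: Replaces A's char-to-rank dictionary (built by a redundant quadratic nested loop over the sorted list) and second lookup pass with a single pass over the sorted characters that derives each rank from adjacency of equal neighbours (prev/rank counter), with no mapping table at all.
import Mathlib
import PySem

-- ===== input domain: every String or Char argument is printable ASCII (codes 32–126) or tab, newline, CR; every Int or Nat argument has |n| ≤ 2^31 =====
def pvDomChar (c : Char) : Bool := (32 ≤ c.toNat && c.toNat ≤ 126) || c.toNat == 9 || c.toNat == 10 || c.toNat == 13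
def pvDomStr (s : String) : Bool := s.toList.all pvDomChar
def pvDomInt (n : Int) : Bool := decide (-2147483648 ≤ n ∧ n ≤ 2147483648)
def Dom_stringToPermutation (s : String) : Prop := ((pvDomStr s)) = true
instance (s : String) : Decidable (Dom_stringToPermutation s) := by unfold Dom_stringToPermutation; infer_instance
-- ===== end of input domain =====

-- B replaces A's dictionary (built by a redundant quadratic nested loop) with one
-- adjacency pass over the sorted characters (simpler, no mapping table).

-- ===== PORT A =====
-- inner loop body: 'if number not in x: x[number] = acc; acc = acc + 1'
def pvAStep (st : PySem.Dict Char Int × Int) (number : Char) : PySem.Dict Char Int × Int :=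
  if st.1.contains number then st else (st.1.insert number st.2, st.2 + 1)

-- one inner pass 'for number in s_sorted: …'
def pvABuild (t : List Char) (st : PySem.Dict Char Int × Int) : PySem.Dict Char Int × Int :=
  t.foldl pvAStep st

-- 'number = ord(ch)' is dead code (immediately shadowed by the inner loop variable) and is not ported.
-- 'x[i]' never raises (every i of s_sorted was inserted), so the lookup is ported as getD.
def stringToPermutation (s : String) : String :=
  let s_sorted := PySem.List.sorted s.toList (fun c => c) false
  let st := s_sorted.foldl (fun st _ => pvABuild s_sorted st) (PySem.Dict.empty, 1)
  let x := st.1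
  String.ofList (s_sorted.foldl (fun perm i => perm ++ PySem.Int.toChars (x.getD i 0)) [])

-- ===== PORT B =====
-- loop body over state (result, prev, rank)
def pvBStep (st : List Char × Option Char × Int) (ch : Char) : List Char × Option Char × Int :=
  if some ch ≠ st.2.1 then (st.1 ++ PySem.Int.toChars (st.2.2 + 1), some ch, st.2.2 + 1)
  else (st.1 ++ PySem.Int.toChars st.2.2, st.2.1, st.2.2)

def stringToPermutation_alt (s : String) : String :=
  let st := (PySem.List.sorted s.toList (fun c => c) false).foldl pvBStep ([], none, 0)
  String.ofList st.1

-- ===== PRECONDITION & SPEC =====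
def Spec_stringToPermutation (s : String) (out : String) : Prop := out = stringToPermutation_alt s
instance (s : String) (out : String) : Decidable (Spec_stringToPermutation s out) := by unfold Spec_stringToPermutation; infer_instance

-- ===== CLAIM (what is proved, stated in full; the proofs are below) =====
def Claim_equal_stringToPermutation : Prop := ∀ (s : String), Dom_stringToPermutation s → Spec_stringToPermutation s (stringToPermutation s)

-- ===== LEMMAS AND PROOFS =====

-- insert-if-absent never overwrites: an existing binding survives a build pass
theorem pvABuild_get?_preserve (t : List Char) (st : PySem.Dict Char Int × Int)
    (c : Char) (v : Int) (h : st.1.get? c = some v) :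
    (pvABuild t st).1.get? c = some v := by
  induction t generalizing st with
  | nil => simpa [pvABuild] using h
  | cons a rest ih =>
      show (pvABuild rest (pvAStep st a)).1.get? c = some v
      apply ih
      unfold pvAStep
      split
      · exact h
      · rename_i hnc
        by_cases hca : c = a
        · subst hca
          rw [(PySem.Dict.get?_eq_none_iff_contains st.1 c).mpr (by simpa using hnc)] at h
          exact absurd h (by simp)
        · simpa [PySem.Dict.get?_insert_of_ne st.1 st.2 hca] using h

-- after one build pass every element of the traversed list has a binding
theorem pvABuild_isSome (t : List Char) (st : PySem.Dict Char Int × Int)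
    (c : Char) (hc : c ∈ t) : ((pvABuild t st).1.get? c).isSome := by
  induction t generalizing st with
  | nil => cases hc
  | cons a rest ih =>
      show ((pvABuild rest (pvAStep st a)).1.get? c).isSome
      rcases List.mem_cons.mp hc with h | h
      · subst h
        have : ∃ v, (pvAStep st c).1.get? c = some v := by
          unfold pvAStep
          split
          · rename_i hcon
            exact Option.isSome_iff_exists.mp
              (by rw [← PySem.Dict.contains_eq_isSome_get?]; exact hcon)
          · exact ⟨st.2, PySem.Dict.get?_insert_self st.1 c st.2⟩
        rcases this with ⟨v, hv⟩
        rw [pvABuild_get?_preserve rest _ c v hv]; rfl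
      · exact ih (pvAStep st a) h

-- a build pass over a list whose elements are all already bound is the identity
theorem pvABuild_id (t : List Char) (st : PySem.Dict Char Int × Int)
    (h : ∀ c ∈ t, (st.1.get? c).isSome) : pvABuild t st = st := by
  induction t with
  | nil => rfl
  | cons a rest ih =>
      have ha : pvAStep st a = st := by
        unfold pvAStep
        rw [if_pos (by rw [PySem.Dict.contains_eq_isSome_get?]; exact h a (by simp))]
      show pvABuild rest (pvAStep st a) = st
      rw [ha]
      exact ih (fun c hc => h c (by simp [hc]))

-- A's outer loop repeats the build pass; all passes after the first are the identity
theorem pvAOuter_eq (t : List Char) :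
    t.foldl (fun st _ => pvABuild t st) (PySem.Dict.empty, 1)
      = pvABuild t (PySem.Dict.empty, 1) := by
  cases t with
  | nil => rfl
  | cons a rest =>
      simp only [List.foldl_cons]
      have iter : ∀ (l : List Char) (st : PySem.Dict Char Int × Int),
          (∀ c ∈ a :: rest, (st.1.get? c).isSome) →
          l.foldl (fun st _ => pvABuild (a :: rest) st) st = st := by
        intro l
        induction l with
        | nil => intro st _; rfl
        | cons b l ih =>
            intro st hst
            simp only [List.foldl_cons, pvABuild_id _ _ hst]
            exact ih st hst
      exact iter rest _ (fun c hc => pvABuild_isSome _ _ c hc)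

-- main invariant: looking t's elements up in the dictionary built over t equals
-- the adjacency ranks of B's single pass, for sorted t
theorem pv_gen (t : List Char) (x : PySem.Dict Char Int)
    (prev : Option Char) (rank : Int) (out : List Char)
    (hsort : t.Pairwise (· ≤ ·))
    (hx : ∀ c ∈ t, x.get? c = if prev = some c then some rank else none)
    (hprev : ∀ p, prev = some p → ∀ c ∈ t, p ≤ c) :
    t.foldl (fun perm i => perm ++ PySem.Int.toChars ((pvABuild t (x, rank + 1)).1.getD i 0)) out
      = (t.foldl pvBStep (out, prev, rank)).1 := by
  induction t generalizing x prev rank out with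
  | nil => rfl
  | cons c rest ih =>
      have hsort' := (List.pairwise_cons.mp hsort).2
      have hc_le := (List.pairwise_cons.mp hsort).1
      by_cases hp : prev = some c
      · -- repeated character: dictionary unchanged, rank unchanged
        have hget : x.get? c = some rank := by simpa [hp] using hx c (by simp)
        have hstep : pvAStep (x, rank + 1) c = (x, rank + 1) := by
          unfold pvAStep
          rw [if_pos (by rw [PySem.Dict.contains_eq_isSome_get?]; simp [hget])]
        have hbuild : pvABuild (c :: rest) (x, rank + 1) = pvABuild rest (x, rank + 1) := by
          show pvABuild rest (pvAStep (x, rank + 1) c) = _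
          rw [hstep]
        have hlook : (pvABuild rest (x, rank + 1)).1.getD c 0 = rank :=
          PySem.Dict.getD_of_get?_eq_some _ 0 (pvABuild_get?_preserve rest _ c rank hget)
        have hB : pvBStep (out, prev, rank) c = (out ++ PySem.Int.toChars rank, prev, rank) := by
          simp [pvBStep, hp]
        simp only [hbuild, List.foldl_cons, hlook, hB]
        exact ih x prev rank (out ++ PySem.Int.toChars rank) hsort'
          (fun d hd => hx d (by simp [hd])) (fun p hp' d hd => hprev p hp' d (by simp [hd]))
      · -- new character: it is inserted with the next value rank + 1
        have hget : x.get? c = none := by simpa [hp] using hx c (by simp)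
        have hstep : pvAStep (x, rank + 1) c = (x.insert c (rank + 1), rank + 1 + 1) := by
          unfold pvAStep
          rw [if_neg (by rw [PySem.Dict.contains_eq_isSome_get?, hget]; simp)]
        have hbuild : pvABuild (c :: rest) (x, rank + 1)
            = pvABuild rest (x.insert c (rank + 1), rank + 1 + 1) := by
          show pvABuild rest (pvAStep (x, rank + 1) c) = _
          rw [hstep]
        have hlook : (pvABuild rest (x.insert c (rank + 1), rank + 1 + 1)).1.getD c 0 = rank + 1 :=
          PySem.Dict.getD_of_get?_eq_some _ 0
            (pvABuild_get?_preserve rest _ c (rank + 1) (PySem.Dict.get?_insert_self x c (rank + 1)))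
        have hcp : some c ≠ prev := fun h => hp h.symm
        have hB : pvBStep (out, prev, rank) c
            = (out ++ PySem.Int.toChars (rank + 1), some c, rank + 1) := by
          simp [pvBStep, hcp]
        simp only [hbuild, List.foldl_cons, hlook, hB]
        apply ih (x.insert c (rank + 1)) (some c) (rank + 1)
          (out ++ PySem.Int.toChars (rank + 1)) hsort'
        · intro d hd
          by_cases hdc : d = c
          · subst hdc; simp [PySem.Dict.get?_insert_self]
          · rw [PySem.Dict.get?_insert_of_ne x (rank + 1) hdc]
            rw [hx d (by simp [hd])]
            have hne : prev ≠ some d := by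
              intro hpd
              have h1 : d ≤ c := hprev d hpd c (by simp)
              have h2 : c ≤ d := hc_le d hd
              exact hp (by rw [hpd, le_antisymm h1 h2])
            have hcd : ¬ c = d := fun h => hdc h.symm
            simp [hne, hcd]
        · intro p hp' d hd
          cases hp'
          exact hc_le d hd

-- ===== VERDICT (by name: the statement is the Claim_ definition above) =====
theorem stringToPermutation_spec : Claim_equal_stringToPermutation := by
  intro s _
  unfold Spec_stringToPermutation stringToPermutation stringToPermutation_alt
  simp only
  rw [pvAOuter_eq]
  congr 1
  rw [show ((PySem.Dict.empty : PySem.Dict Char Int), (1 : Int))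
      = ((PySem.Dict.empty : PySem.Dict Char Int), (0 : Int) + 1) by norm_num]
  apply pv_gen
  · simpa using PySem.List.sorted_pairwise s.toList (fun c => c)
  · intro c _; simp [PySem.Dict.get?_empty]
  · intro p hp; cases hp
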